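-- pv_equiv track=rewrite | github.com/akshay-greenlang/Code-V1_GreenLang | _archive/04_shadow_development_tree/GreenLang Development/02-Applications/GL-Agent-Factory/cli/commands/ontology.py | _generate_turtle_export
-- ===== SOURCE A (Python) =====
-- ONTOLOGY_CLASSES = {
--     "Equipment": {
--         "uri": "gl:Equipment",
--         "description": "Base class for all industrial equipment",
--         "subclasses": ["ThermalEquipment", "ProcessEquipment", "UtilityEquipment"],
--         "properties": ["hasManufacturer", "hasModel", "hasCapacity", "hasEmissionFactor"],
--     },
--     "ThermalEquipment": {
--         "uri": "gl:ThermalEquipment",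
--         "description": "Equipment that generates or uses heat",
--         "parent": "Equipment",
--         "subclasses": ["Furnace", "Boiler", "Oven", "Dryer", "ThermalOxidizer"],
--         "properties": ["hasMaxTemperature", "hasFuelType", "hasThermalEfficiency"],
--     },
--     "Furnace": {
--         "uri": "gl:Furnace",
--         "description": "Industrial furnace for heat treatment",
--         "parent": "ThermalEquipment",
--         "subclasses": ["DirectFiredFurnace", "IndirectFiredFurnace", "ElectricFurnace"],
--         "properties": ["hasBurnerType", "hasAtmosphere", "hasControlSystem"],
--         "standards": ["NFPA-86", "OSHA-1910.106"],
--     },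
--     "DirectFiredFurnace": {
--         "uri": "gl:DirectFiredFurnace",
--         "description": "Furnace where combustion products contact the work",
--         "parent": "Furnace",
--         "properties": ["hasFlamePattern", "hasCombustionEfficiency"],
--     },
--     "IndirectFiredFurnace": {
--         "uri": "gl:IndirectFiredFurnace",
--         "description": "Furnace where combustion products do not contact the work",
--         "parent": "Furnace",
--         "properties": ["hasRadiantTubes", "hasHeatExchanger"],
--     },
--     "Boiler": {
--         "uri": "gl:Boiler",
--         "description": "Equipment for generating steam or hot water",
--         "parent": "ThermalEquipment",
--         "subclasses": ["FiretubeBoiler", "WatertubeBoiler"],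
--         "properties": ["hasSteamPressure", "hasSteamCapacity"],
--         "standards": ["NFPA-85", "ASME-BPVC"],
--     },
--     "ProcessEquipment": {
--         "uri": "gl:ProcessEquipment",
--         "description": "Equipment for process operations",
--         "parent": "Equipment",
--         "subclasses": ["Reactor", "Separator", "Compressor", "Pump"],
--         "properties": ["hasProcessType", "hasOperatingPressure"],
--     },
--     "Reactor": {
--         "uri": "gl:Reactor",
--         "description": "Chemical reactor equipment",
--         "parent": "ProcessEquipment",
--         "properties": ["hasReactionType", "hasResidenceTime", "hasCatalyst"],
--         "standards": ["OSHA-1910.119"],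
--     },
--     "EmissionSource": {
--         "uri": "gl:EmissionSource",
--         "description": "Source of greenhouse gas emissions",
--         "subclasses": ["CombustionSource", "ProcessSource", "FugitiveSource"],
--         "properties": ["hasEmissionFactor", "hasActivityData", "hasScope"],
--     },
--     "CombustionSource": {
--         "uri": "gl:CombustionSource",
--         "description": "Emission source from fuel combustion",
--         "parent": "EmissionSource",
--         "properties": ["hasFuelType", "hasFuelQuantity", "hasCO2Factor", "hasCH4Factor", "hasN2OFactor"],
--     },
-- }
--
-- def _generate_turtle_export(namespace: str, include_instances: bool) -> str:
--     """Generate Turtle format export."""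
--     lines = [
--         f'@prefix rdf: <http://www.w3.org/1999/02/22-rdf-syntax-ns#> .',
--         f'@prefix rdfs: <http://www.w3.org/2000/01/rdf-schema#> .',
--         f'@prefix owl: <http://www.w3.org/2002/07/owl#> .',
--         f'@prefix xsd: <http://www.w3.org/2001/XMLSchema#> .',
--         f'@prefix gl: <{namespace}> .',
--         '',
--         f'<{namespace}> a owl:Ontology ;',
--         '    rdfs:label "GreenLang Equipment Ontology" .',
--         '',
--     ]
--
--     for name, cls in ONTOLOGY_CLASSES.items():
--         lines.append(f'gl:{name} a owl:Class ;')
--         lines.append(f'    rdfs:label "{name}" ;')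
--         if "description" in cls:
--             lines.append(f'    rdfs:comment "{cls["description"]}" ;')
--         if "parent" in cls:
--             lines.append(f'    rdfs:subClassOf gl:{cls["parent"]} ;')
--         lines[-1] = lines[-1].rstrip(' ;') + ' .'
--         lines.append('')
--
--     return '\n'.join(lines)
-- ===== SOURCE B (Python) =====
-- ONTOLOGY_CLASSES = {
--     "Equipment": {
--         "uri": "gl:Equipment",
--         "description": "Base class for all industrial equipment",
--         "subclasses": ["ThermalEquipment", "ProcessEquipment", "UtilityEquipment"],
--         "properties": ["hasManufacturer", "hasModel", "hasCapacity", "hasEmissionFactor"],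
--     },
--     "ThermalEquipment": {
--         "uri": "gl:ThermalEquipment",
--         "description": "Equipment that generates or uses heat",
--         "parent": "Equipment",
--         "subclasses": ["Furnace", "Boiler", "Oven", "Dryer", "ThermalOxidizer"],
--         "properties": ["hasMaxTemperature", "hasFuelType", "hasThermalEfficiency"],
--     },
--     "Furnace": {
--         "uri": "gl:Furnace",
--         "description": "Industrial furnace for heat treatment",
--         "parent": "ThermalEquipment",
--         "subclasses": ["DirectFiredFurnace", "IndirectFiredFurnace", "ElectricFurnace"],
--         "properties": ["hasBurnerType", "hasAtmosphere", "hasControlSystem"],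
--         "standards": ["NFPA-86", "OSHA-1910.106"],
--     },
--     "DirectFiredFurnace": {
--         "uri": "gl:DirectFiredFurnace",
--         "description": "Furnace where combustion products contact the work",
--         "parent": "Furnace",
--         "properties": ["hasFlamePattern", "hasCombustionEfficiency"],
--     },
--     "IndirectFiredFurnace": {
--         "uri": "gl:IndirectFiredFurnace",
--         "description": "Furnace where combustion products do not contact the work",
--         "parent": "Furnace",
--         "properties": ["hasRadiantTubes", "hasHeatExchanger"],
--     },
--     "Boiler": {
--         "uri": "gl:Boiler",
--         "description": "Equipment for generating steam or hot water",
--         "parent": "ThermalEquipment",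
--         "subclasses": ["FiretubeBoiler", "WatertubeBoiler"],
--         "properties": ["hasSteamPressure", "hasSteamCapacity"],
--         "standards": ["NFPA-85", "ASME-BPVC"],
--     },
--     "ProcessEquipment": {
--         "uri": "gl:ProcessEquipment",
--         "description": "Equipment for process operations",
--         "parent": "Equipment",
--         "subclasses": ["Reactor", "Separator", "Compressor", "Pump"],
--         "properties": ["hasProcessType", "hasOperatingPressure"],
--     },
--     "Reactor": {
--         "uri": "gl:Reactor",
--         "description": "Chemical reactor equipment",
--         "parent": "ProcessEquipment",
--         "properties": ["hasReactionType", "hasResidenceTime", "hasCatalyst"],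
--         "standards": ["OSHA-1910.119"],
--     },
--     "EmissionSource": {
--         "uri": "gl:EmissionSource",
--         "description": "Source of greenhouse gas emissions",
--         "subclasses": ["CombustionSource", "ProcessSource", "FugitiveSource"],
--         "properties": ["hasEmissionFactor", "hasActivityData", "hasScope"],
--     },
--     "CombustionSource": {
--         "uri": "gl:CombustionSource",
--         "description": "Emission source from fuel combustion",
--         "parent": "EmissionSource",
--         "properties": ["hasFuelType", "hasFuelQuantity", "hasCO2Factor", "hasCH4Factor", "hasN2OFactor"],
--     },
-- }
--
-- # optional class fields and how each one becomes a (predicate, object) pair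
-- _OPTIONAL_FIELDS = [
--     ("description", "rdfs:comment", '"%s"'),
--     ("parent", "rdfs:subClassOf", "gl:%s"),
-- ]
--
--
-- def _ontology_triples():
--     """Flatten ONTOLOGY_CLASSES into RDF (subject, predicate, object) triples."""
--     for name, cls in ONTOLOGY_CLASSES.items():
--         subj = "gl:" + name
--         yield subj, "a", "owl:Class"
--         yield subj, "rdfs:label", '"%s"' % name
--         for key, pred, fmt in _OPTIONAL_FIELDS:
--             if key in cls:
--                 yield subj, pred, fmt % cls[key]
--
--
-- def _generate_turtle_export(namespace: str, include_instances: bool) -> str: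
--     """Generate Turtle format export: serialize the triple set grouped by subject."""
--     spo = {}
--     for subj, pred, obj in _ontology_triples():
--         spo.setdefault(subj, []).append(pred + " " + obj)
--     blocks = [s + " " + " ;\n    ".join(po) + " ." for s, po in spo.items()]
--     header = (
--         "@prefix rdf: <http://www.w3.org/1999/02/22-rdf-syntax-ns#> .\n"
--         "@prefix rdfs: <http://www.w3.org/2000/01/rdf-schema#> .\n"
--         "@prefix owl: <http://www.w3.org/2002/07/owl#> .\n"
--         "@prefix xsd: <http://www.w3.org/2001/XMLSchema#> .\n"
--         f"@prefix gl: <{namespace}> .\n"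
--         "\n"
--         f"<{namespace}> a owl:Ontology ;\n"
--         '    rdfs:label "GreenLang Equipment Ontology" .\n'
--         "\n"
--     )
--     return header + "\n\n".join(blocks) + "\n"
-- ===== Notes on version B (the rewrite author's own statement) =====
-- stated objective: alternative
-- what changed: B replaces A's line-list loop with in-place rstrip-mutation of the last line by a two-stage pipeline: a table-driven generator flattens ONTOLOGY_CLASSES into RDF (subject, predicate, object) triples, then a generic serializer groups the triples by subject into a dict of clause lists and joins each group with ' ;\n ' terminated by ' .'.
import Mathlib
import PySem

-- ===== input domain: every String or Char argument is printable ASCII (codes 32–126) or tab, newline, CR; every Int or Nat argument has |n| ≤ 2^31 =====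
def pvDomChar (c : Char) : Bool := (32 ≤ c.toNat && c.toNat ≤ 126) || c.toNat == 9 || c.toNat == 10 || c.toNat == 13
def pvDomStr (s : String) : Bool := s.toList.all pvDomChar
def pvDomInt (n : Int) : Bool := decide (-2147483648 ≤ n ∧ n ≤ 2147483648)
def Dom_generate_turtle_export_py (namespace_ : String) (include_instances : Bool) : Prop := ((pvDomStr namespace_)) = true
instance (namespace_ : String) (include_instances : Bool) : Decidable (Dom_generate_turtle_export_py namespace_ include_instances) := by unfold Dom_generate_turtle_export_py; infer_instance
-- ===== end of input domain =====

-- B replaces A's line-list loop (with its lines[-1] = lines[-1].rstrip(' ;') + ' .' mutation) by a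
-- two-stage pipeline: flatten the class table into RDF (subject, predicate, object) triples, then a
-- generic serializer that groups triples by subject into a dict and joins each group
-- (objective: alternative; same output, same cost).

-- ONTOLOGY_CLASSES, restricted to the fields _generate_turtle_export reads:
-- (name, description?, parent?) in the dict's insertion order (both Pythons share this constant).
def pvOntologyClasses : List (String × Option String × Option String) :=
  [("Equipment", some "Base class for all industrial equipment", none),
   ("ThermalEquipment", some "Equipment that generates or uses heat", some "Equipment"),
   ("Furnace", some "Industrial furnace for heat treatment", some "ThermalEquipment"),
   ("DirectFiredFurnace", some "Furnace where combustion products contact the work", some "Furnace"),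
   ("IndirectFiredFurnace", some "Furnace where combustion products do not contact the work", some "Furnace"),
   ("Boiler", some "Equipment for generating steam or hot water", some "ThermalEquipment"),
   ("ProcessEquipment", some "Equipment for process operations", some "Equipment"),
   ("Reactor", some "Chemical reactor equipment", some "ProcessEquipment"),
   ("EmissionSource", some "Source of greenhouse gas emissions", none),
   ("CombustionSource", some "Emission source from fuel combustion", some "EmissionSource")]

-- ===== PORT A =====
-- hand port of s.rstrip(' ;') (no rstrip-with-chars in PySem): drop trailing chars from {' ', ';'}; exact.
def pvRstripSpaceSemi (s : String) : String :=
  String.ofList ((s.toList.reverse.dropWhile (fun c => c == ' ' || c == ';')).reverse)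

-- the body of A's for-loop over ONTOLOGY_CLASSES (one iteration: append the class's lines,
-- then lines[-1] = lines[-1].rstrip(' ;') + ' .' and append the blank separator)
def pvStep (lines : List String) (nc : String × Option String × Option String) : List String :=
  let lines := lines ++ ["gl:" ++ nc.1 ++ " a owl:Class ;"]
  let lines := lines ++ ["    rdfs:label \"" ++ nc.1 ++ "\" ;"]
  let lines := match nc.2.1 with
    | some d => lines ++ ["    rdfs:comment \"" ++ d ++ "\" ;"]
    | none => lines
  let lines := match nc.2.2 with
    | some p => lines ++ ["    rdfs:subClassOf gl:" ++ p ++ " ;"]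
    | none => lines
  let lines := lines.dropLast ++ [pvRstripSpaceSemi (lines.getLastD "") ++ " ."]
  lines ++ [""]

def generate_turtle_export_py (namespace_ : String) (include_instances : Bool) : String :=
  let lines0 : List String := [
    "@prefix rdf: <http://www.w3.org/1999/02/22-rdf-syntax-ns#> .",
    "@prefix rdfs: <http://www.w3.org/2000/01/rdf-schema#> .",
    "@prefix owl: <http://www.w3.org/2002/07/owl#> .",
    "@prefix xsd: <http://www.w3.org/2001/XMLSchema#> .",
    "@prefix gl: <" ++ namespace_ ++ "> .",
    "",
    "<" ++ namespace_ ++ "> a owl:Ontology ;",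
    "    rdfs:label \"GreenLang Equipment Ontology\" .",
    ""]
  let lines := pvOntologyClasses.foldl pvStep lines0
  PySem.Str.join "\n" lines

-- ===== PORT B =====
-- _OPTIONAL_FIELDS: (field selector, predicate, object formatter); the selector plays the role
-- of Python's 'key in cls' / 'cls[key]' on the restricted (description?, parent?) record.
def pvOptionalFields : List (((Option String × Option String) → Option String) × String × (String → String)) :=
  [(fun c => c.1, "rdfs:comment", fun v => "\"" ++ v ++ "\""),
   (fun c => c.2, "rdfs:subClassOf", fun v => "gl:" ++ v)]

-- _ontology_triples(): the generator's yields, collected in order (flatMap = the nested loop)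
def pvOntologyTriples : List (String × String × String) :=
  pvOntologyClasses.flatMap (fun nc =>
    let subj := "gl:" ++ nc.1
    [(subj, "a", "owl:Class"), (subj, "rdfs:label", "\"" ++ nc.1 ++ "\"")] ++
    pvOptionalFields.flatMap (fun e =>
      match e.1 nc.2 with
      | some v => [(subj, e.2.1, e.2.2 v)]
      | none => []))

-- spo.setdefault(subj, []).append(pred + " " + obj)
def pvAddTriple (d : PySem.Dict String (List String)) (t : String × String × String) :
    PySem.Dict String (List String) :=
  d.modify t.1 [] (fun po => po ++ [t.2.1 ++ " " ++ t.2.2])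

-- s + " " + " ;\n    ".join(po) + " ."
def pvSubjectBlock (p : String × List String) : String :=
  p.1 ++ " " ++ PySem.Str.join " ;\n    " p.2 ++ " ."

-- B's header is one Python string constant (adjacent literals); ported as literal chunks around namespace_.
def generate_turtle_export_py_alt (namespace_ : String) (include_instances : Bool) : String :=
  let spo := pvOntologyTriples.foldl pvAddTriple PySem.Dict.empty
  let blocks := spo.items.map pvSubjectBlock
  let header := "@prefix rdf: <http://www.w3.org/1999/02/22-rdf-syntax-ns#> .\n@prefix rdfs: <http://www.w3.org/2000/01/rdf-schema#> .\n@prefix owl: <http://www.w3.org/2002/07/owl#> .\n@prefix xsd: <http://www.w3.org/2001/XMLSchema#> .\n@prefix gl: <" ++ namespace_ ++ "> .\n\n<" ++ namespace_ ++ "> a owl:Ontology ;\n    rdfs:label \"GreenLang Equipment Ontology\" .\n\n"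
  header ++ (PySem.Str.join "\n\n" blocks ++ "\n")

-- ===== PRECONDITION & SPEC =====
def Spec_generate_turtle_export_py (namespace_ : String) (include_instances : Bool) (out : String) : Prop := out = generate_turtle_export_py_alt namespace_ include_instances
instance (namespace_ : String) (include_instances : Bool) (out : String) : Decidable (Spec_generate_turtle_export_py namespace_ include_instances out) := by unfold Spec_generate_turtle_export_py; infer_instance

-- ===== CLAIM (what is proved, stated in full; the proofs are below) =====
def Claim_equal_generate_turtle_export_py : Prop := ∀ (namespace_ : String) (include_instances : Bool), Dom_generate_turtle_export_py namespace_ include_instances → Spec_generate_turtle_export_py namespace_ include_instances (generate_turtle_export_py namespace_ include_instances)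

-- ===== LEMMAS AND PROOFS =====

-- the dict B builds, as a literal association list (subject, clause strings) in class order
def pvItemsLit : List (String × List String) :=
  [("gl:Equipment", ["a owl:Class", "rdfs:label \"Equipment\"", "rdfs:comment \"Base class for all industrial equipment\""]),
   ("gl:ThermalEquipment", ["a owl:Class", "rdfs:label \"ThermalEquipment\"", "rdfs:comment \"Equipment that generates or uses heat\"", "rdfs:subClassOf gl:Equipment"]),
   ("gl:Furnace", ["a owl:Class", "rdfs:label \"Furnace\"", "rdfs:comment \"Industrial furnace for heat treatment\"", "rdfs:subClassOf gl:ThermalEquipment"]),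
   ("gl:DirectFiredFurnace", ["a owl:Class", "rdfs:label \"DirectFiredFurnace\"", "rdfs:comment \"Furnace where combustion products contact the work\"", "rdfs:subClassOf gl:Furnace"]),
   ("gl:IndirectFiredFurnace", ["a owl:Class", "rdfs:label \"IndirectFiredFurnace\"", "rdfs:comment \"Furnace where combustion products do not contact the work\"", "rdfs:subClassOf gl:Furnace"]),
   ("gl:Boiler", ["a owl:Class", "rdfs:label \"Boiler\"", "rdfs:comment \"Equipment for generating steam or hot water\"", "rdfs:subClassOf gl:ThermalEquipment"]),
   ("gl:ProcessEquipment", ["a owl:Class", "rdfs:label \"ProcessEquipment\"", "rdfs:comment \"Equipment for process operations\"", "rdfs:subClassOf gl:Equipment"]),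
   ("gl:Reactor", ["a owl:Class", "rdfs:label \"Reactor\"", "rdfs:comment \"Chemical reactor equipment\"", "rdfs:subClassOf gl:ProcessEquipment"]),
   ("gl:EmissionSource", ["a owl:Class", "rdfs:label \"EmissionSource\"", "rdfs:comment \"Source of greenhouse gas emissions\""]),
   ("gl:CombustionSource", ["a owl:Class", "rdfs:label \"CombustionSource\"", "rdfs:comment \"Emission source from fuel combustion\"", "rdfs:subClassOf gl:EmissionSource"])]

-- A's lines for one subject block: first line carries the subject, middle clauses get
-- "    … ;", the last clause gets " ." (the rstrip-and-terminate effect, in closed form)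
def pvTailLines : List String → List String
  | [] => []
  | [c] => ["    " ++ c ++ " ."]
  | c :: rest => ("    " ++ c ++ " ;") :: pvTailLines rest

def pvLinesOf (p : String × List String) : List String :=
  match p.2 with
  | [] => [p.1 ++ " ."]
  | [c] => [p.1 ++ " " ++ c ++ " ."]
  | c :: rest => (p.1 ++ " " ++ c ++ " ;") :: pvTailLines rest

-- the lines A's loop produces when started from the empty list: the block line groups, each followed by ""
def pvLlines : List String := (pvItemsLit.map (fun p => pvLinesOf p ++ [""])).flatten

theorem pv_dropLast {α : Type} (l : List α) (x : α) (xs : List α) :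
    (l ++ x :: xs).dropLast = l ++ (x :: xs).dropLast :=
  List.dropLast_append_of_ne_nil (List.cons_ne_nil x xs)

theorem pv_getLastD {α : Type} (l : List α) (x : α) (xs : List α) (d : α) :
    (l ++ x :: xs).getLastD d = (x :: xs).getLastD d := by
  rcases h : (x :: xs).getLast? with _ | y
  · exact absurd h (by simp)
  · simp [List.getLastD_eq_getLast?, List.getLast?_append, h]

theorem pvStep_append (l : List String) (nc : String × Option String × Option String) :
    pvStep l nc = l ++ pvStep [] nc := by
  rcases nc with ⟨n, d, p⟩
  cases d <;> cases p <;>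
    simp only [pvStep, List.nil_append, List.cons_append, List.append_assoc,
               pv_dropLast, pv_getLastD]

theorem pvFold_append (cs : List (String × Option String × Option String)) (l : List String) :
    cs.foldl pvStep l = l ++ cs.foldl pvStep [] := by
  induction cs generalizing l with
  | nil => simp
  | cons c cs ih =>
    simp only [List.foldl_cons]
    rw [ih (pvStep l c), ih (pvStep [] c), pvStep_append l c, List.append_assoc]

set_option maxRecDepth 8192 in
theorem pvFold_eq (l : List String) : pvOntologyClasses.foldl pvStep l = l ++ pvLlines := by
  rw [pvFold_append, show pvOntologyClasses.foldl pvStep [] = pvLlines from by decide]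

-- B's dict, evaluated: the subjects are pairwise distinct, so the groups are the
-- per-class clause lists in class order
set_option maxRecDepth 8192 in
theorem pvItemsEq :
    (pvOntologyTriples.foldl pvAddTriple PySem.Dict.empty).items = pvItemsLit := by
  decide

-- join over an append of two nonempty lists splits
theorem pvJoin_append_ne (sep : List Char) :
    ∀ (xs ys : List (List Char)), xs ≠ [] → ys ≠ [] →
      PySem.Chars.join sep (xs ++ ys) = PySem.Chars.join sep xs ++ sep ++ PySem.Chars.join sep ys
  | [], _, hxs, _ => absurd rfl hxs
  | [a], y :: ys, _, _ => by
      simp [PySem.Chars.join_cons_cons, PySem.Chars.join_singleton, List.append_assoc]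
  | a :: b :: xs, y :: ys, _, hys => by
      have ih := pvJoin_append_ne sep (b :: xs) (y :: ys) (by simp) (by simp)
      have h1 : (a :: b :: xs) ++ (y :: ys) = a :: b :: (xs ++ y :: ys) := by simp
      rw [h1, PySem.Chars.join_cons_cons,
          show (b :: (xs ++ y :: ys)) = (b :: xs) ++ (y :: ys) from by simp, ih,
          PySem.Chars.join_cons_cons]
      simp [List.append_assoc]

-- a block's lines followed by the blank line, joined
theorem pvJoin_blank (sep : List Char) (b : List (List Char)) (hb : b ≠ []) :
    PySem.Chars.join sep (b ++ [[]]) = PySem.Chars.join sep b ++ sep := by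
  rw [pvJoin_append_ne sep b [[]] hb (by simp), PySem.Chars.join_singleton]
  simp

-- joining blank-separated line groups with sep = joining the per-group joins with sep ++ sep, plus a trailing sep
theorem pvCore (sep : List Char) :
    ∀ (l : List (List (List Char))), l ≠ [] → (∀ x ∈ l, x ≠ []) →
      PySem.Chars.join sep ((l.map (· ++ [[]])).flatten)
        = PySem.Chars.join (sep ++ sep) (l.map (PySem.Chars.join sep)) ++ sep
  | [], h, _ => absurd rfl h
  | [b], _, h => by
      simp only [List.map_cons, List.map_nil, List.flatten_cons, List.flatten_nil, List.append_nil]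
      rw [pvJoin_blank sep b (h b (by simp)), PySem.Chars.join_singleton]
  | b :: c :: rest, _, h => by
      have ih := pvCore sep (c :: rest) (by simp) (fun x hx => h x (by simp [hx]))
      have hys : ((c :: rest).map (· ++ [[]])).flatten ≠ [] := by
        simp only [List.map_cons, List.flatten_cons]
        intro hcon
        exact absurd (List.append_eq_nil_iff.mp ((List.append_eq_nil_iff.mp hcon).1)).2 (by simp)
      rw [show ((b :: c :: rest).map (· ++ [[]])).flatten
            = (b ++ [[]]) ++ ((c :: rest).map (· ++ [[]])).flatten from by
          simp [List.append_assoc],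
          pvJoin_append_ne sep (b ++ [[]]) _ (by simp) hys,
          pvJoin_blank sep b (h b (by simp)), ih]
      simp only [List.map_cons]
      rw [PySem.Chars.join_cons_cons]
      simp [List.append_assoc]

-- " ;" then newline then the indent IS B's clause separator
theorem pvGlue (X : List Char) :
    " ;".toList ++ ("\n".toList ++ ("    ".toList ++ X)) = " ;\n    ".toList ++ X := by
  rw [show (" ;".toList : List Char) ++ ("\n".toList ++ ("    ".toList ++ X))
        = (" ;".toList ++ "\n".toList ++ "    ".toList) ++ X from by simp [List.append_assoc],
      show (" ;".toList : List Char) ++ "\n".toList ++ "    ".toList = " ;\n    ".toList from by decide]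

-- A's tail lines for a clause list, joined with newline = the clauses joined with B's
-- clause separator, indented once and terminated with " ." (purely symbolic)
theorem pvTailLines_join (cs : List String) (h : cs ≠ []) :
    PySem.Chars.join "\n".toList ((pvTailLines cs).map String.toList)
      = "    ".toList ++ PySem.Chars.join " ;\n    ".toList (cs.map String.toList) ++ " .".toList := by
  induction cs with
  | nil => exact absurd rfl h
  | cons c rest ih =>
    cases rest with
    | nil =>
      simp only [pvTailLines, List.map_cons, List.map_nil,
                 PySem.Chars.join_singleton, String.toList_append]
    | cons c2 rest2 =>
      rw [show pvTailLines (c :: c2 :: rest2) = ("    " ++ c ++ " ;") :: pvTailLines (c2 :: rest2) from rfl]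
      rw [show (("    " ++ c ++ " ;") :: pvTailLines (c2 :: rest2)).map String.toList
            = ("    " ++ c ++ " ;").toList :: (pvTailLines (c2 :: rest2)).map String.toList from by
          simp]
      rw [show (pvTailLines (c2 :: rest2)).map String.toList
            = (("    " ++ c2 ++ (if rest2 = [] then " ." else " ;")).toList) ::
              ((pvTailLines (c2 :: rest2)).map String.toList).tail from by
          cases rest2 <;> simp [pvTailLines]]
      rw [PySem.Chars.join_cons_cons, ← show (pvTailLines (c2 :: rest2)).map String.toList
            = (("    " ++ c2 ++ (if rest2 = [] then " ." else " ;")).toList) ::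
              ((pvTailLines (c2 :: rest2)).map String.toList).tail from by
          cases rest2 <;> simp [pvTailLines]]
      rw [ih (by simp),
          show List.map String.toList (c :: c2 :: rest2)
            = c.toList :: c2.toList :: List.map String.toList rest2 from by simp,
          PySem.Chars.join_cons_cons]
      simp only [String.toList_append, List.map_cons, List.append_assoc]
      rw [pvGlue]

-- one block: A's lines joined with newline = B's subject block string
theorem pvBlockEq (s : String) (cs : List String) (h : cs ≠ []) :
    PySem.Chars.join "\n".toList ((pvLinesOf (s, cs)).map String.toList)
      = (pvSubjectBlock (s, cs)).toList := by
  cases cs with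
  | nil => exact absurd rfl h
  | cons c rest =>
    cases rest with
    | nil =>
      simp only [pvLinesOf, pvSubjectBlock, List.map_cons, List.map_nil,
                 PySem.Chars.join_singleton, String.toList_append, PySem.Str.toList_join]
    | cons c2 rest2 =>
      rw [show pvLinesOf (s, c :: c2 :: rest2)
            = (s ++ " " ++ c ++ " ;") :: pvTailLines (c2 :: rest2) from rfl]
      rw [show ((s ++ " " ++ c ++ " ;") :: pvTailLines (c2 :: rest2)).map String.toList
            = (s ++ " " ++ c ++ " ;").toList :: (pvTailLines (c2 :: rest2)).map String.toList from by
          simp]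
      rw [show (pvTailLines (c2 :: rest2)).map String.toList
            = (("    " ++ c2 ++ (if rest2 = [] then " ." else " ;")).toList) ::
              ((pvTailLines (c2 :: rest2)).map String.toList).tail from by
          cases rest2 <;> simp [pvTailLines]]
      rw [PySem.Chars.join_cons_cons, ← show (pvTailLines (c2 :: rest2)).map String.toList
            = (("    " ++ c2 ++ (if rest2 = [] then " ." else " ;")).toList) ::
              ((pvTailLines (c2 :: rest2)).map String.toList).tail from by
          cases rest2 <;> simp [pvTailLines]]
      rw [pvTailLines_join (c2 :: rest2) (by simp)]
      simp only [pvSubjectBlock, PySem.Str.toList_join, String.toList_append,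
                 List.map_cons, PySem.Chars.join_cons_cons, List.append_assoc]
      rw [pvGlue]

-- every class has at least one clause, and the literal lists are nonempty
theorem pvItems_ne : ∀ p ∈ pvItemsLit, p.2 ≠ [] := by decide

theorem pvLinesOf_ne (p : String × List String) : pvLinesOf p ≠ [] := by
  rcases p with ⟨s, _ | ⟨c, _ | ⟨c2, rest⟩⟩⟩ <;> simp [pvLinesOf]

-- the whole tail: A's class lines joined with newline = B's blocks joined with the blank separator
set_option maxRecDepth 8192 in
set_option maxHeartbeats 1000000 in
theorem pvTail :
    PySem.Chars.join "\n".toList (pvLlines.map String.toList)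
      = PySem.Chars.join ("\n".toList ++ "\n".toList)
          (((pvItemsLit.map pvSubjectBlock).map String.toList)) ++ "\n".toList := by
  have hmap : pvLlines.map String.toList
      = ((pvItemsLit.map (fun p => (pvLinesOf p).map String.toList)).map (· ++ [[]])).flatten := by
    simp only [pvLlines, List.map_flatten, List.map_map]
    congr 1
  have hblocks : (pvItemsLit.map (fun p => (pvLinesOf p).map String.toList)).map
        (PySem.Chars.join "\n".toList)
      = (pvItemsLit.map pvSubjectBlock).map String.toList := by
    rw [List.map_map, List.map_map]
    refine List.map_congr_left (fun p hp => ?_)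
    have := pvBlockEq p.1 p.2 (pvItems_ne p hp)
    simpa using this
  rw [hmap, pvCore "\n".toList _
        (fun hcon => (by decide : pvItemsLit ≠ []) (List.map_eq_nil_iff.mp hcon))
        (by
          intro x hx
          rw [List.mem_map] at hx
          obtain ⟨p, _, rfl⟩ := hx
          simp [List.map_eq_nil_iff, pvLinesOf_ne p]),
      hblocks]

-- the header lines joined (ns the namespace string)
set_option maxRecDepth 8192 in
set_option maxHeartbeats 1000000 in
theorem pvHeaderJoin (ns : String) :
    PySem.Chars.join "\n".toList (List.map String.toList
      ["@prefix rdf: <http://www.w3.org/1999/02/22-rdf-syntax-ns#> .",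
       "@prefix rdfs: <http://www.w3.org/2000/01/rdf-schema#> .",
       "@prefix owl: <http://www.w3.org/2002/07/owl#> .",
       "@prefix xsd: <http://www.w3.org/2001/XMLSchema#> .",
       "@prefix gl: <" ++ ns ++ "> .",
       "",
       "<" ++ ns ++ "> a owl:Ontology ;",
       "    rdfs:label \"GreenLang Equipment Ontology\" .",
       ""])
    = ("@prefix rdf: <http://www.w3.org/1999/02/22-rdf-syntax-ns#> .\n@prefix rdfs: <http://www.w3.org/2000/01/rdf-schema#> .\n@prefix owl: <http://www.w3.org/2002/07/owl#> .\n@prefix xsd: <http://www.w3.org/2001/XMLSchema#> .\n@prefix gl: <").toList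
      ++ ns.toList ++ ("> .\n\n<").toList ++ ns.toList
      ++ ("> a owl:Ontology ;\n    rdfs:label \"GreenLang Equipment Ontology\" .\n").toList := by
  simp only [List.map_cons, List.map_nil, String.toList_append,
             PySem.Chars.join_cons_cons, PySem.Chars.join_singleton]
  rw [show ("@prefix rdf: <http://www.w3.org/1999/02/22-rdf-syntax-ns#> .\n@prefix rdfs: <http://www.w3.org/2000/01/rdf-schema#> .\n@prefix owl: <http://www.w3.org/2002/07/owl#> .\n@prefix xsd: <http://www.w3.org/2001/XMLSchema#> .\n@prefix gl: <").toList
        = "@prefix rdf: <http://www.w3.org/1999/02/22-rdf-syntax-ns#> .".toList ++ "\n".toList ++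
          "@prefix rdfs: <http://www.w3.org/2000/01/rdf-schema#> .".toList ++ "\n".toList ++
          "@prefix owl: <http://www.w3.org/2002/07/owl#> .".toList ++ "\n".toList ++
          "@prefix xsd: <http://www.w3.org/2001/XMLSchema#> .".toList ++ "\n".toList ++
          "@prefix gl: <".toList from by decide,
      show ("> .\n\n<").toList = "> .".toList ++ "\n".toList ++ "".toList ++ "\n".toList ++ "<".toList from by decide,
      show ("> a owl:Ontology ;\n    rdfs:label \"GreenLang Equipment Ontology\" .\n").toList
        = "> a owl:Ontology ;".toList ++ "\n".toList ++
          "    rdfs:label \"GreenLang Equipment Ontology\" .".toList ++ "\n".toList ++ "".toList from by decide]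
  simp [List.append_assoc]

theorem pvLlinesC_ne : pvLlines.map String.toList ≠ [] := by
  have h : pvLlines ≠ [] := by decide
  simpa [List.map_eq_nil_iff] using h

-- ===== VERDICT (by name: the statement is the Claim_ definition above) =====
set_option maxRecDepth 8192 in
set_option maxHeartbeats 1000000 in
theorem generate_turtle_export_py_spec : Claim_equal_generate_turtle_export_py := by
  intro ns b _
  unfold Spec_generate_turtle_export_py
  simp only [generate_turtle_export_py, generate_turtle_export_py_alt]
  rw [pvFold_eq, pvItemsEq]
  apply String.toList_inj.mp
  simp only [PySem.Str.toList_join, String.toList_append]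
  rw [List.map_append, pvJoin_append_ne _ _ _ (by simp) pvLlinesC_ne,
      pvHeaderJoin, pvTail,
      show ("\n".toList ++ "\n".toList : List Char) = "\n\n".toList from by decide,
      show ("> a owl:Ontology ;\n    rdfs:label \"GreenLang Equipment Ontology\" .\n\n").toList
        = ("> a owl:Ontology ;\n    rdfs:label \"GreenLang Equipment Ontology\" .\n").toList ++ "\n".toList from by decide]
  simp only [List.append_assoc]
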